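-- pv_equiv track=rewrite | github.com/francoisrobertlab/seqtools | mnaseseqtools/FirstDyadPosition.py | highest_signal
-- ===== SOURCE A (Python) =====
-- def highest_signal(track, chromosome, start, end):
--     '''Returns coordinate having the highest signal between specified coordinates'''
--     intervals = []
--     for (position, score) in track:
--         if position >= start and position < end:
--             intervals.append((position, score))
--     if not intervals:
--         return None
--     max = intervals[0]
--     for interval in intervals:
--         if interval[1] > max[1]:
--             max = interval
--     return max
-- ===== SOURCE B (Python) =====
-- def highest_signal(track, chromosome, start, end):
--     '''Returns coordinate having the highest signal between specified coordinates'''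
--     best = None
--     for (position, score) in track:
--         if start <= position < end:
--             if best is None or score > best[1]:
--                 best = (position, score)
--     return best
-- ===== Notes on version B (the rewrite author's own statement) =====
-- stated objective: simpler
-- what changed: B replaces A's two-phase build-a-filtered-list-then-rescan-for-the-max structure with a single pass that maintains the current best in-range pair in an Optional accumulator.
import Mathlib
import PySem

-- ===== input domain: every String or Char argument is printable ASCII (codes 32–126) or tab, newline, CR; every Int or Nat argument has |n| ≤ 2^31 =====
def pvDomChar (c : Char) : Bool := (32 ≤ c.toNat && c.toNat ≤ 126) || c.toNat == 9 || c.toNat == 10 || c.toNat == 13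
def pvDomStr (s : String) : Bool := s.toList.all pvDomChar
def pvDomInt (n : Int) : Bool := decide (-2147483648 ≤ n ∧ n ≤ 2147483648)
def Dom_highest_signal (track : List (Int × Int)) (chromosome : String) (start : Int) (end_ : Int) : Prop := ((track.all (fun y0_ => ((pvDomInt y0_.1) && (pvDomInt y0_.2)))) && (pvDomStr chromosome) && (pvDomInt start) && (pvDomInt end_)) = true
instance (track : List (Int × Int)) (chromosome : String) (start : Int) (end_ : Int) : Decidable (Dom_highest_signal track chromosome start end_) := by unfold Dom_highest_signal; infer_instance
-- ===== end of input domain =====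

-- B replaces A's build-a-filtered-list-then-rescan structure with a single pass keeping the best in-range pair in an Option accumulator (simpler; same O(n) cost).


-- ===== PORT A =====
-- A: build the list of in-range intervals, then scan it for the first maximum.
def highest_signal (track : List (Int × Int)) (chromosome : String) (start : Int) (end_ : Int) : Option (Int × Int) :=
  let intervals := track.foldl (fun acc p => if p.1 ≥ start ∧ p.1 < end_ then acc ++ [p] else acc) []
  match intervals with
  | [] => none
  | m0 :: _ => some (intervals.foldl (fun m iv => if iv.2 > m.2 then iv else m) m0)

-- ===== PORT B =====
-- B: one pass, Option accumulator holding the current best in-range pair.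
def hsStep (start end_ : Int) (best : Option (Int × Int)) (p : Int × Int) : Option (Int × Int) :=
  if start ≤ p.1 ∧ p.1 < end_ then
    match best with
    | none => some p
    | some b => if p.2 > b.2 then some p else some b
  else best

def highest_signal_alt (track : List (Int × Int)) (chromosome : String) (start : Int) (end_ : Int) : Option (Int × Int) :=
  track.foldl (hsStep start end_) none

-- ===== PRECONDITION & SPEC =====
def Spec_highest_signal (track : List (Int × Int)) (chromosome : String) (start : Int) (end_ : Int) (out : Option (Int × Int)) : Prop := out = highest_signal_alt track chromosome start end_
instance (track : List (Int × Int)) (chromosome : String) (start : Int) (end_ : Int) (out : Option (Int × Int)) : Decidable (Spec_highest_signal track chromosome start end_ out) := by unfold Spec_highest_signal; infer_instance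

-- ===== CLAIM (what is proved, stated in full; the proofs are below) =====
def Claim_equal_highest_signal : Prop := ∀ (track : List (Int × Int)) (chromosome : String) (start : Int) (end_ : Int), Dom_highest_signal track chromosome start end_ → Spec_highest_signal track chromosome start end_ (highest_signal track chromosome start end_)

-- ===== LEMMAS AND PROOFS =====

-- A's accumulation of in-range pairs is a filter.
theorem hs_build_filter (start end_ : Int) (l : List (Int × Int)) (acc : List (Int × Int)) :
    l.foldl (fun acc p => if p.1 ≥ start ∧ p.1 < end_ then acc ++ [p] else acc) acc
      = acc ++ l.filter (fun p => decide (start ≤ p.1 ∧ p.1 < end_)) := by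
  induction l generalizing acc with
  | nil => simp
  | cons h t ih =>
    simp only [List.foldl_cons, List.filter_cons]
    by_cases hc : start ≤ h.1 ∧ h.1 < end_
    · rw [if_pos (by exact ⟨hc.1, hc.2⟩), if_pos (by simpa using hc), ih]; simp
    · rw [if_neg (by tauto), if_neg (by simpa using hc), ih]

-- Folding B's step over a list once a best is held only sees the filtered elements.
theorem hs_fold_some (start end_ : Int) (l : List (Int × Int)) (b : Int × Int) :
    l.foldl (hsStep start end_) (some b)
      = some ((l.filter (fun p => decide (start ≤ p.1 ∧ p.1 < end_))).foldl
          (fun m iv => if iv.2 > m.2 then iv else m) b) := by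
  induction l generalizing b with
  | nil => simp
  | cons h t ih =>
    simp only [List.foldl_cons, List.filter_cons, hsStep]
    by_cases hc : start ≤ h.1 ∧ h.1 < end_
    · by_cases hg : h.2 > b.2
      · simp [hc.1, hc.2, hg, ih]
      · simp [hc.1, hc.2, hg, ih]
    · simp only [if_neg hc, if_neg (by simpa using hc : ¬ (decide (start ≤ h.1 ∧ h.1 < end_) = true))]
      exact ih b

-- B's fold from none is: none if nothing in range, else the max-scan of the filtered list.
theorem hs_fold_none (start end_ : Int) (l : List (Int × Int)) :
    l.foldl (hsStep start end_) none
      = match l.filter (fun p => decide (start ≤ p.1 ∧ p.1 < end_)) with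
        | [] => none
        | m0 :: t => some (t.foldl (fun m iv => if iv.2 > m.2 then iv else m) m0) := by
  induction l with
  | nil => simp
  | cons h t ih =>
    simp only [List.foldl_cons, List.filter_cons, hsStep]
    by_cases hc : start ≤ h.1 ∧ h.1 < end_
    · rw [if_pos hc, if_pos (by simpa using hc), hs_fold_some]
    · rw [if_neg hc, if_neg (by simpa using hc), ih]

-- ===== VERDICT (by name: the statement is the Claim_ definition above) =====
theorem highest_signal_spec : Claim_equal_highest_signal := by
  intro track chromosome start end_ _
  unfold Spec_highest_signal highest_signal highest_signal_alt
  rw [hs_build_filter, hs_fold_none]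
  simp only [List.nil_append]
  cases hf : track.filter (fun p => decide (start ≤ p.1 ∧ p.1 < end_)) with
  | nil => simp
  | cons m0 t =>
    simp only [List.foldl_cons]
    rw [if_neg (lt_irrefl m0.2)]
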